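-- pv_equiv track=rewrite | github.com/e1kim/baekjoon | 2485_가로수.py | howManyTree
-- ===== SOURCE A (Python) =====
-- def GCD(x, y) :
--     '''
--     x, y의 최대공약수를 반환하는 함수
--     '''
--     if x%y == 0:
--         return y
--
--     return GCD(y,x%y)
--
-- def howManyTree(n, myInput) :
--     '''
--     모든 가로수가 같은 간격이 되도록 새로 심어야 하는 가로수의 최소수를 리턴하는 함수를 구현하세요.
--     '''
--
--     distance = []
--     for i in range(n-1):
--         distance.append(myInput[i+1] - myInput[i])
--
--     gcd = distance[0]
--     for i in range(1,len(distance)):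
--         gcd = GCD(distance[i],gcd)
--
--     total = myInput[-1] - myInput[0]
--     total = total//gcd
--     total = total - n + 1
--
--     cnt = total
--
--     return cnt
-- ===== SOURCE B (Python) =====
-- def howManyTree(n, myInput):
--     '''
--     Same result in one fused pass: a running gcd over consecutive gaps,
--     with an iterative Euclid loop and no intermediate distance list.
--     '''
--     g = 0
--     prev = myInput[0]
--     for i in range(1, n):
--         cur = myInput[i]
--         x, y = cur - prev, g
--         while y:
--             x, y = y, x % y
--         g = x
--         prev = cur
--     return (myInput[-1] - myInput[0]) // g - n + 1
-- ===== Notes on version B (the rewrite author's own statement) =====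
-- stated objective: alternative
-- what changed: Single fused pass over the positions keeping (running gcd, previous element) as state, with an iterative while-loop Euclid instead of the recursive helper, so no intermediate distance list is built; same closed-form final expression.
import Mathlib
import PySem

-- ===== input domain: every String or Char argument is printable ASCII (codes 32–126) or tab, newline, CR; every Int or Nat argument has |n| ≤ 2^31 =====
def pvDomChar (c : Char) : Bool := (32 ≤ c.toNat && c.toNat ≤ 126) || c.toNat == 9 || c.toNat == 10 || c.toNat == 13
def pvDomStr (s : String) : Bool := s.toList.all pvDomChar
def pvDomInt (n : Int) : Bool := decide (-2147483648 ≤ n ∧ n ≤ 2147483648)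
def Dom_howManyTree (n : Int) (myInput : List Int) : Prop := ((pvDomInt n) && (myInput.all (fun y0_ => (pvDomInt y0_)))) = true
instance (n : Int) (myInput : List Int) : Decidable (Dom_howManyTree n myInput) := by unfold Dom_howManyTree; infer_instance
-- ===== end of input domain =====

-- B fuses the gap computation into a single pass with an iterative Euclid loop, so no
-- intermediate distance list is materialized (objective: alternative decomposition; same cost).

-- ===== PORT A =====
-- recursive GCD helper of A; Python's x % y is PySem.Int.mod (mod x 0 = x in Lean where Python raises — outside Pre_)
def GCD (x y : Int) : Int :=
  if PySem.Int.mod x y = 0 then y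
  else GCD y (PySem.Int.mod x y)
termination_by (if y = 0 then x.natAbs + 1 else y.natAbs)
decreasing_by
  rename_i h
  by_cases hy : y = 0
  · subst hy
    have hx : PySem.Int.mod x 0 = x := by simp [PySem.Int.mod]
    rw [hx] at h ⊢
    simp only [if_neg h]
    norm_num
  · have hb : (PySem.Int.mod x y).natAbs < y.natAbs := by
      rcases lt_or_gt_of_ne hy with h1 | h1
      · have := PySem.Int.mod_neg_bounds x h1; omega
      · have h2 := PySem.Int.mod_nonneg x h1
        have h3 := PySem.Int.mod_lt x h1; omega
    simp only [if_neg hy]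
    split <;> omega

def howManyTree (n : Int) (myInput : List Int) : Int :=
  -- distance = []; for i in range(n-1): distance.append(myInput[i+1] - myInput[i])
  let distance := (PySem.List.pyRange 0 (n-1) 1).foldl
      (fun acc i => acc ++ [PySem.List.pyGetD myInput (i+1) 0 - PySem.List.pyGetD myInput i 0]) []
  -- gcd = distance[0]; for i in range(1, len(distance)): gcd = GCD(distance[i], gcd)
  let gcd0 := PySem.List.pyGetD distance 0 0
  let gcd := (PySem.List.pyRange 1 (distance.length : Int) 1).foldl
      (fun g i => GCD (PySem.List.pyGetD distance i 0) g) gcd0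
  -- total = myInput[-1] - myInput[0]; total = total//gcd; total = total - n + 1
  let total := PySem.List.pyGetD myInput (-1) 0 - PySem.List.pyGetD myInput 0 0
  let total2 := PySem.Int.floordiv total gcd
  total2 - n + 1

-- ===== PORT B =====
-- iterative Euclid: x, y = ...; while y: x, y = y, x % y; return x
def iterGCD (x y : Int) : Int :=
  if y = 0 then x else iterGCD y (PySem.Int.mod x y)
termination_by (if y = 0 then 0 else 2 * y.natAbs + 1)
decreasing_by
  rename_i hy
  have hb : (PySem.Int.mod x y).natAbs < y.natAbs := by
    rcases lt_or_gt_of_ne hy with h1 | h1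
    · have := PySem.Int.mod_neg_bounds x h1; omega
    · have h2 := PySem.Int.mod_nonneg x h1
      have h3 := PySem.Int.mod_lt x h1; omega
  simp only [if_neg hy]
  split <;> omega

def howManyTree_alt (n : Int) (myInput : List Int) : Int :=
  -- g = 0; prev = myInput[0]; for i in range(1, n): cur = myInput[i]; x,y = cur-prev, g; while y: x,y = y, x%y; g = x; prev = cur
  let s := (PySem.List.pyRange 1 n 1).foldl
      (fun (s : Int × Int) i =>
        (iterGCD (PySem.List.pyGetD myInput i 0 - s.2) s.1, PySem.List.pyGetD myInput i 0))
      (0, PySem.List.pyGetD myInput 0 0)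
  PySem.Int.floordiv (PySem.List.pyGetD myInput (-1) 0 - PySem.List.pyGetD myInput 0 0) s.1 - n + 1

-- ===== PRECONDITION & SPEC =====
-- Pre_ excludes exactly the inputs where A raises: n < 2 or len(myInput) < n (IndexError on
-- distance[0] / myInput[i+1]) and a zero first gap (ZeroDivisionError in GCD or in total//gcd).
def Pre_howManyTree (n : Int) (myInput : List Int) : Prop :=
  2 ≤ n ∧ n ≤ (myInput.length : Int) ∧ myInput.getD 1 0 ≠ myInput.getD 0 0
instance (n : Int) (myInput : List Int) : Decidable (Pre_howManyTree n myInput) := by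
  unfold Pre_howManyTree; infer_instance
def pvWitness_howManyTree : Int × List Int := (3, [0, 2, 4])

def Spec_howManyTree (n : Int) (myInput : List Int) (out : Int) : Prop := out = howManyTree_alt n myInput
instance (n : Int) (myInput : List Int) (out : Int) : Decidable (Spec_howManyTree n myInput out) := by unfold Spec_howManyTree; infer_instance

-- ===== CLAIM (what is proved, stated in full; the proofs are below) =====
def Claim_equal_howManyTree : Prop := ∀ (n : Int) (myInput : List Int), Dom_howManyTree n myInput → Pre_howManyTree n myInput → Spec_howManyTree n myInput (howManyTree n myInput)

-- ===== LEMMAS AND PROOFS =====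

-- the list of consecutive gaps of t, with previous element p
def pvGaps (p : Int) : List Int → List Int
  | [] => []
  | c :: cs => (c - p) :: pvGaps c cs

-- GCD never returns 0 when its second argument is nonzero
lemma GCD_ne_zero (x y : Int) (h : y ≠ 0) : GCD x y ≠ 0 := by
  fun_induction GCD x y with
  | case1 x y hm => exact h
  | case2 x y hm ih => exact ih hm

-- the recursive and the iterative Euclid agree for nonzero second argument
lemma GCD_eq_iter (x y : Int) (h : y ≠ 0) : GCD x y = iterGCD x y := by
  fun_induction GCD x y with
  | case1 x y hm =>
    rw [iterGCD, if_neg h, hm, iterGCD, if_pos rfl]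
  | case2 x y hm ih =>
    rw [iterGCD, if_neg h]
    exact ih hm

-- the two gcd folds over the gap list agree when started from a nonzero seed
lemma foldGCD_eq (ds : List Int) : ∀ g : Int, g ≠ 0 →
    ds.foldl (fun g d => GCD d g) g = ds.foldl (fun g d => iterGCD d g) g := by
  induction ds with
  | nil => intro g _; rfl
  | cons d ds ih =>
    intro g hg
    simp only [List.foldl_cons]
    rw [GCD_eq_iter d g hg, ← GCD_eq_iter d g hg]
    exact ih _ (GCD_ne_zero d g hg)

-- B's state fold computes the gcd fold over the gap list (first component)
lemma foldPair_eq (t : List Int) : ∀ (p g : Int),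
    (t.foldl (fun (s : Int × Int) cur => (iterGCD (cur - s.2) s.1, cur)) (g, p)).1
      = (pvGaps p t).foldl (fun g d => iterGCD d g) g := by
  induction t with
  | nil => intro p g; rfl
  | cons c cs ih =>
    intro p g
    simp only [List.foldl_cons, pvGaps]
    exact ih c (iterGCD (c - p) g)

-- A's index-built distance list is the gap list of the taken prefix
lemma gapsMap_eq (m : Nat) : ∀ (p : Int) (rest : List Int), m ≤ rest.length →
    (List.range m).map (fun k => (p :: rest).getD (k+1) 0 - (p :: rest).getD k 0)
      = pvGaps p (rest.take m) := by
  induction m with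
  | zero => intro p rest _; simp [pvGaps]
  | succ m ih =>
    intro p rest hm
    cases rest with
    | nil => simp at hm
    | cons r rs =>
      have hh : ∀ k ∈ List.range m,
          ((fun k => (p :: r :: rs).getD (k+1) 0 - (p :: r :: rs).getD k 0) ∘ Nat.succ) k
            = (fun k => (r :: rs).getD (k+1) 0 - (r :: rs).getD k 0) k := by
        intro k _; simp
      rw [List.range_succ_eq_map, List.map_cons, List.map_map, List.map_congr_left hh,
          ih r rs (by simpa using hm), List.take_succ_cons, pvGaps]
      simp

-- indices a..b of xs, read through pyGetD, are the corresponding sublist of xs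
lemma mapGetD_range (xs : List Int) (d : Int) (a b : Int) (h0 : 0 ≤ a)
    (hb : b ≤ (xs.length : Int)) :
    (PySem.List.pyRange a b 1).map (fun j => PySem.List.pyGetD xs j d)
      = (xs.drop a.toNat).take (b - a).toNat := by
  rw [PySem.List.pyRange_one, List.map_map]
  apply List.ext_getElem
  · simp; omega
  · intro k h1 h2
    simp only [List.length_map, List.length_range] at h1
    rw [List.getElem_map, List.getElem_take, List.getElem_drop, List.getElem_range]
    show PySem.List.pyGetD xs (a + (k : Int)) d = xs[a.toNat + k]
    rw [PySem.List.pyGetD_eq_getElem xs (i := a + (k : Int)) d (by omega) (by omega)]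
    congr 1
    omega

-- ===== VERDICT (by name: the statement is the Claim_ definition above) =====
theorem howManyTree_spec : Claim_equal_howManyTree := by
  intro n myInput _ hpre
  obtain ⟨h2, hlen, hne⟩ := hpre
  unfold Spec_howManyTree howManyTree howManyTree_alt
  cases myInput with
  | nil => simp at hlen; omega
  | cons p rest =>
    simp only [List.length_cons] at hlen
    have hm1 : 1 ≤ (n-1).toNat := by omega
    have hmr : (n-1).toNat ≤ rest.length := by push_cast at hlen; omega
    -- A's distance list is the gap list of the prefix
    have hdist : (PySem.List.pyRange 0 (n-1) 1).foldl
        (fun acc i => acc ++ [PySem.List.pyGetD (p :: rest) (i+1) 0 - PySem.List.pyGetD (p :: rest) i 0]) []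
        = pvGaps p (rest.take (n-1).toNat) := by
      rw [PySem.List.foldl_append_singleton_eq_map, PySem.List.pyRange_one]
      simp only [List.nil_append, List.map_map, Int.sub_zero]
      rw [← gapsMap_eq (n-1).toNat p rest hmr]
      apply List.map_congr_left
      intro k _
      have e2 : (0 : Int) + (k : Int) = ((k : Nat) : Int) := by ring
      simp only [Function.comp, e2, PySem.List.pyGetD_natCast]
      rw [show ((k : Int) + 1) = ((k + 1 : Nat) : Int) by push_cast; ring,
          PySem.List.pyGetD_natCast]
    -- B's index loop reads exactly the same prefix
    have hslice : (PySem.List.pyRange 1 n 1).foldl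
        (fun (s : Int × Int) i =>
          (iterGCD (PySem.List.pyGetD (p :: rest) i 0 - s.2) s.1, PySem.List.pyGetD (p :: rest) i 0))
        (0, p)
        = (rest.take (n-1).toNat).foldl
            (fun (s : Int × Int) cur => (iterGCD (cur - s.2) s.1, cur)) (0, p) := by
      rw [← List.foldl_map (f := fun i => PySem.List.pyGetD (p :: rest) i 0)
            (g := fun (s : Int × Int) cur => (iterGCD (cur - s.2) s.1, cur)),
          mapGetD_range (p :: rest) 0 1 n (by norm_num) (by simp only [List.length_cons]; push_cast; omega)]
      simp only [Int.toNat_one, List.drop_one, List.tail_cons]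
    rw [hdist]
    simp only [PySem.List.pyGetD_zero_cons]
    rw [hslice]
    -- the prefix is nonempty, so the gap list starts with the first gap
    cases rest with
    | nil => simp at hmr; omega
    | cons r rs =>
      have htake : (r :: rs).take (n-1).toNat = r :: rs.take ((n-1).toNat - 1) := by
        cases hmm : (n-1).toNat with
        | zero => omega
        | succ m' => simp
      rw [htake]
      simp only [pvGaps, PySem.List.pyGetD_zero_cons]
      -- the first gap is nonzero (Pre_)
      have hd0 : r - p ≠ 0 := by
        simp only [List.getD_cons_succ, List.getD_cons_zero] at hne
        omega
      -- A's index loop over distance[1:] = gcd fold over the tail of the gap list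
      rw [PySem.List.foldl_pyRange_pyGetD' ((r - p) :: pvGaps r (rs.take ((n-1).toNat - 1))) 0
            (fun g d => GCD d g) _ (by norm_num)]
      simp only [Int.toNat_one, List.drop_one, List.tail_cons]
      -- B's state fold = gcd fold over the gap list, seeded by the first gap
      rw [foldPair_eq]
      simp only [pvGaps, List.foldl_cons]
      have hseed : iterGCD (r - p) 0 = r - p := by rw [iterGCD, if_pos rfl]
      rw [hseed, foldGCD_eq _ _ hd0]
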